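-- pv_equiv track=rewrite | github.com/phbaum/django_ipsconnect3 | ipsconnect3/forms.py | _clean_password
-- ===== SOURCE A (Python) =====
-- def _clean_password(password=''):
--     """
--     Cleans the password in accordance with IPS Connect input cleaning routines
--     Replaces HTML-relevant characters with respective HTML entities
--     """
--     htmlentities = [
--         ('&',   '&amp;'), # this needs to run first to avoid replacing later ampersands
--         ('\\',  '&#092;'),
--         ('!',   '&#33;'),
--         ('$',   '&#036;'),
--         ('"',   '&quot;'),
--         ('<',   '&lt;'),
--         ('>',   '&gt;'),
--         ('\'',  '&#39;'),
--     ]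
--     for char, entity in htmlentities:
--         password = password.replace(char, entity)
--     return password
-- ===== SOURCE B (Python) =====
-- def _clean_password(password=''):
--     """Single-pass HTML-entity escaping via a precomputed translation table."""
--     table = str.maketrans({
--         '&': '&amp;',
--         '\\': '&#092;',
--         '!': '&#33;',
--         '$': '&#036;',
--         '"': '&quot;',
--         '<': '&lt;',
--         '>': '&gt;',
--         "'": '&#39;',
--     })
--     return password.translate(table)
-- ===== Notes on version B (the rewrite author's own statement) =====
-- stated objective: idiomatic
-- what changed: Replaces the chain of eight sequential str.replace passes (each rescanning the whole string) with one precomputed str.maketrans table applied in a single translate pass.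
import Mathlib
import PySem

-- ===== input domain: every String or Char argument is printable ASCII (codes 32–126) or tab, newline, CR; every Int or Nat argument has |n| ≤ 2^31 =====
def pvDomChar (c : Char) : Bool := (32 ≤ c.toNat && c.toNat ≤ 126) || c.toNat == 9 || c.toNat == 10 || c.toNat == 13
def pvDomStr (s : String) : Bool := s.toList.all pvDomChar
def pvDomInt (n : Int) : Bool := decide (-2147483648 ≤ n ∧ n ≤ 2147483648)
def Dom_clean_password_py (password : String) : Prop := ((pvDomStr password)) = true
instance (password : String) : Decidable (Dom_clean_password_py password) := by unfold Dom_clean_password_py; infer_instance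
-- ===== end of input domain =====

-- B changes A's eight sequential .replace passes into one precomputed per-character table applied in a single pass (idiomatic; same result).

-- ===== PORT A =====
-- the htmlentities list, folded over with password = password.replace(char, entity)
def clean_password_py (password : String) : String :=
  [("&", "&amp;"), ("\\", "&#092;"), ("!", "&#33;"), ("$", "&#036;"),
   ("\"", "&quot;"), ("<", "&lt;"), (">", "&gt;"), ("'", "&#39;")].foldl
    (fun pw ce => PySem.Str.replace pw ce.1 ce.2) password

-- ===== PORT B =====
-- str.maketrans table as a per-character function; password.translate(table) = one pass mapping each char
def pvTable (c : Char) : List Char :=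
  if c = '&' then "&amp;".toList
  else if c = '\\' then "&#092;".toList
  else if c = '!' then "&#33;".toList
  else if c = '$' then "&#036;".toList
  else if c = '"' then "&quot;".toList
  else if c = '<' then "&lt;".toList
  else if c = '>' then "&gt;".toList
  else if c = '\'' then "&#39;".toList
  else [c]

def clean_password_py_alt (password : String) : String :=
  String.ofList (password.toList.flatMap pvTable)

-- ===== PRECONDITION & SPEC =====
def Spec_clean_password_py (password : String) (out : String) : Prop := out = clean_password_py_alt password
instance (password : String) (out : String) : Decidable (Spec_clean_password_py password out) := by unfold Spec_clean_password_py; infer_instance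

-- ===== CLAIM (what is proved, stated in full; the proofs are below) =====
def Claim_equal_clean_password_py : Prop := ∀ (password : String), Dom_clean_password_py password → Spec_clean_password_py password (clean_password_py password)

-- ===== LEMMAS AND PROOFS =====

-- single-char substitution function used to characterise one .replace pass
def pvSub (k : Char) (new : List Char) (c : Char) : List Char := if c = k then new else [c]

lemma replace_go_single (k : Char) (new : List Char) :
    ∀ (l acc : List Char),
      PySem.Chars.replace.go [k] new l.length l acc = acc.reverse ++ l.flatMap (pvSub k new) := by
  intro l
  induction l with
  | nil => intro acc; simp [PySem.Chars.replace.go]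
  | cons c t ih =>
    intro acc
    by_cases h : c = k
    · subst h
      simp [PySem.Chars.replace.go, List.isPrefixOf, ih, pvSub]
    · simp [PySem.Chars.replace.go, List.isPrefixOf, h, ih, pvSub, Ne.symm h]

lemma replace_single (k : Char) (new : List Char) (s : List Char) :
    PySem.Chars.replace s [k] new = s.flatMap (pvSub k new) := by
  simpa [PySem.Chars.replace] using replace_go_single k new s []

-- the composed effect of the seven later passes on each character produced by the first
lemma table_fuse (c : Char) :
    (((((((pvSub '&' "&amp;".toList c).flatMap (pvSub '\\' "&#092;".toList)).flatMap
        (pvSub '!' "&#33;".toList)).flatMap (pvSub '$' "&#036;".toList)).flatMap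
        (pvSub '"' "&quot;".toList)).flatMap (pvSub '<' "&lt;".toList)).flatMap
        (pvSub '>' "&gt;".toList)).flatMap (pvSub '\'' "&#39;".toList) = pvTable c := by
  by_cases h1 : c = '&'; · subst h1; decide
  by_cases h2 : c = '\\'; · subst h2; decide
  by_cases h3 : c = '!'; · subst h3; decide
  by_cases h4 : c = '$'; · subst h4; decide
  by_cases h5 : c = '"'; · subst h5; decide
  by_cases h6 : c = '<'; · subst h6; decide
  by_cases h7 : c = '>'; · subst h7; decide
  by_cases h8 : c = '\''; · subst h8; decide
  simp [pvSub, pvTable, h1, h2, h3, h4, h5, h6, h7, h8]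

-- ===== VERDICT (by name: the statement is the Claim_ definition above) =====
theorem clean_password_py_spec : Claim_equal_clean_password_py := by
  intro password _
  show _ = _
  unfold clean_password_py clean_password_py_alt
  simp only [List.foldl, PySem.Str.replace, String.toList_ofList]
  rw [show ("&".toList = ['&']) from rfl, show ("\\".toList = ['\\']) from rfl,
      show ("!".toList = ['!']) from rfl, show ("$".toList = ['$']) from rfl,
      show ("\"".toList = ['"']) from rfl, show ("<".toList = ['<']) from rfl,
      show (">".toList = ['>']) from rfl, show ("'".toList = ['\'']) from rfl]
  simp only [replace_single, List.flatMap_assoc]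
  congr 1
  exact List.flatMap_congr (fun c _ => by
    simpa [List.flatMap_assoc] using table_fuse c)
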